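-- pv_equiv track=rewrite | github.com/Chavelier/TIPE_chess_bitboard | board.py | mask_bishop_attack
-- ===== SOURCE A (Python) =====
-- def mask_bishop_attack(case):
--     """ int , bool -> U64
--     renvoi le bitboard de l'attaque du fou situé sur la case passée en argument """
--
--     attack = 0
--
--     rank, file = case//8, case % 8  # ligne et colonne de la pieces
--     for i in range(1, min(7-rank, 7-file)):
--         r, f = rank+i, file+i
--         attack = attack | 1 << (r*8 + f)
--     for i in range(1, min(rank, file)):
--         r, f = rank-i, file-i
--         attack = attack | 1 << (r*8 + f)
--     for i in range(1, min(7-rank, file)):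
--         r, f = rank+i, file-i
--         attack = attack | 1 << (r*8 + f)
--     for i in range(1, min(rank, 7-file)):
--         r, f = rank-i, file+i
--         attack = attack | 1 << r*8 + f
--
--     return attack
-- ===== SOURCE B (Python) =====
-- def mask_bishop_attack(case):
--     attack = 0
--     rank, file = case // 8, case % 8
--     for f in range(1, 7):
--         if f == file:
--             continue
--         for r in (rank + (f - file), rank - (f - file)):
--             if rank < r <= 6 or 1 <= r < rank:
--                 attack |= 1 << (r * 8 + f)
--     return attack
-- ===== Notes on version B (the rewrite author's own statement) =====
-- stated objective: alternative
-- what changed: Replaces A's four directional outward ray walks by a single scan over the interior files 1..6, directly computing the at most two clipped diagonal squares on each file and testing whether they lie strictly between the bishop and the board edge.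
-- outside the precondition, e.g. on mask_bishop_attack(-9): A raises ValueError, B raises ValueError
import Mathlib
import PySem

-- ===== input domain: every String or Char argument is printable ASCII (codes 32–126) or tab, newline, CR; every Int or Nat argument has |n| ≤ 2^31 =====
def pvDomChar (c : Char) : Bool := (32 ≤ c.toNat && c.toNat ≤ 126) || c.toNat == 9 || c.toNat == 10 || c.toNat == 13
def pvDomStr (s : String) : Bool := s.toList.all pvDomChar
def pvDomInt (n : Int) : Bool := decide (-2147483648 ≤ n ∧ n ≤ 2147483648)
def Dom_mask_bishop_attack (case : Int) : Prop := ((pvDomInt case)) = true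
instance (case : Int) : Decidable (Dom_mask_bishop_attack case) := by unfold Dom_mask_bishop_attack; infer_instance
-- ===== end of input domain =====

-- B replaces A's four directional outward ray walks by one scan over the interior files,
-- computing the (at most two) clipped diagonal squares per file directly (alternative decomposition).

-- ===== PORT A =====
def mask_bishop_attack (case : Int) : Int :=
  let attack : Int := 0
  let rank : Int := PySem.Int.floordiv case 8
  let file : Int := PySem.Int.mod case 8
  let attack := (PySem.List.pyRange 1 (min (7 - rank) (7 - file)) 1).foldl
    (fun attack i => PySem.Int.bor attack (1 <<< ((rank + i) * 8 + (file + i)).toNat)) attack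
  let attack := (PySem.List.pyRange 1 (min rank file) 1).foldl
    (fun attack i => PySem.Int.bor attack (1 <<< ((rank - i) * 8 + (file - i)).toNat)) attack
  let attack := (PySem.List.pyRange 1 (min (7 - rank) file) 1).foldl
    (fun attack i => PySem.Int.bor attack (1 <<< ((rank + i) * 8 + (file - i)).toNat)) attack
  let attack := (PySem.List.pyRange 1 (min rank (7 - file)) 1).foldl
    (fun attack i => PySem.Int.bor attack (1 <<< ((rank - i) * 8 + (file + i)).toNat)) attack
  attack

-- ===== PORT B =====
def mask_bishop_attack_alt (case : Int) : Int :=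
  let rank : Int := PySem.Int.floordiv case 8
  let file : Int := PySem.Int.mod case 8
  (PySem.List.pyRange 1 7 1).foldl (fun attack f =>
    if f = file then attack
    else
      [rank + (f - file), rank - (f - file)].foldl (fun attack r =>
        if (rank < r ∧ r ≤ 6) ∨ (1 ≤ r ∧ r < rank) then
          PySem.Int.bor attack (1 <<< (r * 8 + f).toNat)
        else attack) attack) 0

-- ===== PRECONDITION & SPEC =====
-- Pre_ excludes exactly case ≤ -9, where Python A raises ValueError (a left shift by a
-- negative amount on the first walked square); A returns normally on every case ≥ -8.
def Pre_mask_bishop_attack (case : Int) : Prop := -8 ≤ case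
instance (case : Int) : Decidable (Pre_mask_bishop_attack case) := by unfold Pre_mask_bishop_attack; infer_instance
def pvWitness_mask_bishop_attack : Int := 27

def Spec_mask_bishop_attack (case : Int) (out : Int) : Prop := out = mask_bishop_attack_alt case
instance (case : Int) (out : Int) : Decidable (Spec_mask_bishop_attack case out) := by unfold Spec_mask_bishop_attack; infer_instance

-- ===== CLAIM (what is proved, stated in full; the proofs are below) =====
def Claim_equal_mask_bishop_attack : Prop := ∀ (case : Int), Dom_mask_bishop_attack case → Pre_mask_bishop_attack case → Spec_mask_bishop_attack case (mask_bishop_attack case)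

-- ===== LEMMAS AND PROOFS =====

lemma nat_or_shl (m n s : Nat) : (m ||| n) <<< s = (m <<< s) ||| (n <<< s) := by
  apply Nat.eq_of_testBit_eq; intro i
  simp [Nat.testBit_shiftLeft, Nat.testBit_or]
  by_cases h : s ≤ i <;> simp [h, Bool.and_or_distrib_left]

lemma natmul256 (k : Nat) : ((k : Int)) * 256 = ((k * 256 : Nat) : Int) := by
  push_cast; ring

lemma nat_or_mul256 (m n : Nat) : (m ||| n) * 256 = (m * 256) ||| (n * 256) := by
  have h := nat_or_shl m n 8
  simp only [Nat.shiftLeft_eq] at h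
  norm_num at h
  exact h

lemma bor_mul256 (a b : Int) (ha : 0 ≤ a) (hb : 0 ≤ b) :
    (PySem.Int.bor a b) * 256 = PySem.Int.bor (a * 256) (b * 256) := by
  obtain ⟨m, rfl⟩ : ∃ m : Nat, a = (m : Int) := ⟨a.toNat, by omega⟩
  obtain ⟨n, rfl⟩ : ∃ n : Nat, b = (n : Int) := ⟨b.toNat, by omega⟩
  rw [PySem.Int.bor_natCast, natmul256, natmul256, natmul256, PySem.Int.bor_natCast]
  exact congrArg _ (nat_or_mul256 m n)

lemma bor_nonneg (a b : Int) (ha : 0 ≤ a) (hb : 0 ≤ b) : 0 ≤ PySem.Int.bor a b := by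
  rw [PySem.Int.bor_of_nonneg ha hb]; exact Int.natCast_nonneg _

lemma term_shift (k : Nat) : (((1 <<< (k + 8) : Nat)) : Int) = ((1 <<< k : Nat) : Int) * 256 := by
  rw [natmul256]
  exact congrArg _ (by simp [Nat.shiftLeft_eq, pow_add])

lemma pyRange_nil (m : Int) (h : m ≤ 1) : PySem.List.pyRange 1 m 1 = [] := by
  simp [PySem.List.pyRange, show ¬((1:Int) < m) by omega]

lemma foldl_nonneg (l : List Int) (q : Int → Int → Int)
    (hq : ∀ (a : Int), ∀ x ∈ l, 0 ≤ a → 0 ≤ q a x) :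
    ∀ x : Int, 0 ≤ x → 0 ≤ l.foldl q x := by
  induction l with
  | nil => intro x hx; simpa using hx
  | cons i t ih =>
    intro x hx
    simp only [List.foldl_cons]
    exact ih (fun a y hy ha => hq a y (by simp [hy]) ha) _ (hq x i (by simp) hx)

lemma foldl_mul256 (l : List Int) (p q : Int → Int → Int)
    (hpq : ∀ (a : Int), ∀ x ∈ l, 0 ≤ a → p (a * 256) x = q a x * 256)
    (hq : ∀ (a : Int), ∀ x ∈ l, 0 ≤ a → 0 ≤ q a x) :
    ∀ x : Int, 0 ≤ x → l.foldl p (x * 256) = (l.foldl q x) * 256 := by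
  induction l with
  | nil => intro x _; simp
  | cons i t ih =>
    intro x hx
    simp only [List.foldl_cons]
    rw [hpq x i (by simp) hx]
    exact ih (fun a y hy ha => hpq a y (by simp [hy]) ha)
      (fun a y hy ha => hq a y (by simp [hy]) ha) _ (hq x i (by simp) hx)

lemma fd_bracket (c : Int) : PySem.Int.floordiv c 8 * 8 ≤ c ∧ c < (PySem.Int.floordiv c 8 + 1) * 8 :=
  (PySem.Int.floordiv_eq_iff_of_pos (by norm_num)).mp rfl

lemma fd_add8 (c : Int) : PySem.Int.floordiv (c + 8) 8 = PySem.Int.floordiv c 8 + 1 := by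
  have h2 := fd_bracket c
  rw [PySem.Int.floordiv_eq_iff_of_pos (by norm_num)]
  omega

lemma md_add8 (c : Int) : PySem.Int.mod (c + 8) 8 = PySem.Int.mod c 8 := by
  have h := PySem.Int.floordiv_mul_add_mod c 8
  have h' := PySem.Int.floordiv_mul_add_mod (c + 8) 8
  have h2 := fd_bracket c
  have h3 := fd_bracket (c + 8)
  omega

lemma md_bounds (c : Int) : 0 ≤ PySem.Int.mod c 8 ∧ PySem.Int.mod c 8 < 8 := by
  have h := PySem.Int.floordiv_mul_add_mod c 8
  have h2 := fd_bracket c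
  omega

lemma stepA (c : Int) (hc : 56 ≤ c) :
    mask_bishop_attack (c + 8) = mask_bishop_attack c * 256 := by
  simp only [mask_bishop_attack]
  rw [fd_add8, md_add8]
  have hr : 7 ≤ PySem.Int.floordiv c 8 := by have := fd_bracket c; omega
  have hf := md_bounds c
  set r := PySem.Int.floordiv c 8 with hrdef
  set f := PySem.Int.mod c 8 with hfdef
  rw [pyRange_nil (min (7 - (r + 1)) (7 - f)) (by omega),
      pyRange_nil (min (7 - r) (7 - f)) (by omega),
      pyRange_nil (min (7 - (r + 1)) f) (by omega),
      pyRange_nil (min (7 - r) f) (by omega),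
      min_eq_right (show f ≤ r + 1 by omega), min_eq_right (show f ≤ r by omega),
      min_eq_right (show 7 - f ≤ r + 1 by omega), min_eq_right (show 7 - f ≤ r by omega)]
  simp only [List.foldl_nil]
  have h2 := foldl_mul256 (PySem.List.pyRange 1 f 1)
      (fun attack i => PySem.Int.bor attack ((1 <<< ((r + 1 - i) * 8 + (f - i)).toNat : Nat) : Int))
      (fun attack i => PySem.Int.bor attack ((1 <<< ((r - i) * 8 + (f - i)).toNat : Nat) : Int))
      (by
        intro a x hx ha
        rw [PySem.List.mem_pyRange_one] at hx
        beta_reduce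
        rw [show ((r + 1 - x) * 8 + (f - x)).toNat = ((r - x) * 8 + (f - x)).toNat + 8 by omega,
            term_shift, ← bor_mul256 a _ ha (Int.natCast_nonneg _)])
      (fun a x _ ha => bor_nonneg _ _ ha (Int.natCast_nonneg _))
      0 le_rfl
  rw [show ((0:Int) * 256) = 0 by ring] at h2
  rw [h2]
  exact foldl_mul256 (PySem.List.pyRange 1 (7 - f) 1)
      (fun attack i => PySem.Int.bor attack ((1 <<< ((r + 1 - i) * 8 + (f + i)).toNat : Nat) : Int))
      (fun attack i => PySem.Int.bor attack ((1 <<< ((r - i) * 8 + (f + i)).toNat : Nat) : Int))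
      (by
        intro a x hx ha
        rw [PySem.List.mem_pyRange_one] at hx
        beta_reduce
        rw [show ((r + 1 - x) * 8 + (f + x)).toNat = ((r - x) * 8 + (f + x)).toNat + 8 by omega,
            term_shift, ← bor_mul256 a _ ha (Int.natCast_nonneg _)])
      (fun a x _ ha => bor_nonneg _ _ ha (Int.natCast_nonneg _))
      _ (foldl_nonneg _ _ (fun a x _ ha => bor_nonneg _ _ ha (Int.natCast_nonneg _)) 0 le_rfl)

lemma innerB (rank file x a : Int) (h7 : 7 ≤ rank) (hx1 : 1 ≤ x) (hx6 : x ≤ 6)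
    (hf0 : 0 ≤ file) (hf7 : file ≤ 7) (hne : x ≠ file) :
    List.foldl (fun attack r =>
        if (rank < r ∧ r ≤ 6) ∨ (1 ≤ r ∧ r < rank) then
          PySem.Int.bor attack ((1 <<< (r * 8 + x).toNat : Nat) : Int)
        else attack) a [rank + (x - file), rank - (x - file)]
      = PySem.Int.bor a
          ((1 <<< ((if x < file then rank + (x - file) else rank - (x - file)) * 8 + x).toNat : Nat) : Int) := by
  simp only [List.foldl_cons, List.foldl_nil]
  split_ifs <;> first | rfl | omega

lemma stepB (c : Int) (hc : 56 ≤ c) :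
    mask_bishop_attack_alt (c + 8) = mask_bishop_attack_alt c * 256 := by
  simp only [mask_bishop_attack_alt]
  rw [fd_add8, md_add8]
  have hr : 7 ≤ PySem.Int.floordiv c 8 := by have := fd_bracket c; omega
  have hf := md_bounds c
  set r := PySem.Int.floordiv c 8 with hrdef
  set f := PySem.Int.mod c 8 with hfdef
  have h2 := foldl_mul256 (PySem.List.pyRange 1 7 1)
      (fun attack x =>
        if x = f then attack
        else
          List.foldl (fun attack rr =>
            if (r + 1 < rr ∧ rr ≤ 6) ∨ (1 ≤ rr ∧ rr < r + 1) then
              PySem.Int.bor attack ((1 <<< (rr * 8 + x).toNat : Nat) : Int)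
            else attack) attack [r + 1 + (x - f), r + 1 - (x - f)])
      (fun attack x =>
        if x = f then attack
        else
          List.foldl (fun attack rr =>
            if (r < rr ∧ rr ≤ 6) ∨ (1 ≤ rr ∧ rr < r) then
              PySem.Int.bor attack ((1 <<< (rr * 8 + x).toNat : Nat) : Int)
            else attack) attack [r + (x - f), r - (x - f)])
      (by
        intro a x hx ha
        rw [PySem.List.mem_pyRange_one] at hx
        beta_reduce
        by_cases hxf : x = f
        · simp [hxf]
        · rw [if_neg hxf, if_neg hxf,
              innerB (r + 1) f x (a * 256) (by omega) (by omega) (by omega) (by omega) (by omega) hxf,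
              innerB r f x a (by omega) (by omega) (by omega) (by omega) (by omega) hxf]
          by_cases hlt : x < f
          · rw [if_pos hlt, if_pos hlt,
                show ((r + 1 + (x - f)) * 8 + x).toNat = ((r + (x - f)) * 8 + x).toNat + 8 by omega,
                term_shift, ← bor_mul256 a _ ha (Int.natCast_nonneg _)]
          · rw [if_neg hlt, if_neg hlt,
                show ((r + 1 - (x - f)) * 8 + x).toNat = ((r - (x - f)) * 8 + x).toNat + 8 by omega,
                term_shift, ← bor_mul256 a _ ha (Int.natCast_nonneg _)])
      (by
        intro a x hx ha
        rw [PySem.List.mem_pyRange_one] at hx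
        beta_reduce
        by_cases hxf : x = f
        · simpa [hxf] using ha
        · rw [if_neg hxf,
              innerB r f x a (by omega) (by omega) (by omega) (by omega) (by omega) hxf]
          exact bor_nonneg _ _ ha (Int.natCast_nonneg _))
      0 le_rfl
  rw [show ((0:Int) * 256) = 0 by ring] at h2
  exact h2

set_option maxHeartbeats 1000000 in
lemma small_agree : ∀ n : Fin 72,
    mask_bishop_attack ((n : Nat) - 8 : Int) = mask_bishop_attack_alt ((n : Nat) - 8 : Int) := by
  decide

lemma agree_upto : ∀ k : Nat, ∀ c : Int, -8 ≤ c → c ≤ 63 + 8 * k →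
    mask_bishop_attack c = mask_bishop_attack_alt c := by
  intro k
  induction k with
  | zero =>
    intro c h1 h2
    have hn : c = ((c + 8).toNat : Int) - 8 := by omega
    have hlt : (c + 8).toNat < 72 := by omega
    rw [hn]
    exact small_agree ⟨(c + 8).toNat, hlt⟩
  | succ k ih =>
    intro c h1 h2
    by_cases hc : c ≤ 63 + 8 * k
    · exact ih c h1 hc
    · have hc8 : c = (c - 8) + 8 := by ring
      rw [hc8, stepA (c - 8) (by omega), stepB (c - 8) (by omega),
          ih (c - 8) (by omega) (by omega)]

-- ===== VERDICT (by name: the statement is the Claim_ definition above) =====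
theorem mask_bishop_attack_spec : Claim_equal_mask_bishop_attack := by
  intro case _ hpre
  unfold Spec_mask_bishop_attack
  exact agree_upto case.toNat case hpre (by omega)
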